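-- pv_equiv track=rewrite | github.com/FGG100y/lc-brain-gym | src/solu_technique/prefix_sum_前缀和技巧/parallel_numpy.py | down_sweep
-- ===== SOURCE A (Python) =====
-- def down_sweep(arr):
--     n = len(arr)
--     step = n // 2
--     arr[-1] = 0
--     while step > 0:
--         for i in range(0, n, step * 2):
--             if i + step < n:
--                 temp = arr[i + step - 1]
--                 arr[i + step - 1] = arr[i + step * 2 - 1]
--                 arr[i + step * 2 - 1] += temp
--         step //= 2
--     return arr
-- ===== SOURCE B (Python) =====
-- def down_sweep(arr):
--     arr[-1] = 0
--     _sweep(arr, len(arr), len(arr) // 2)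
--     return arr
--
--
-- def _sweep(arr, n, step):
--     # one level: descending loop over the segment indices that have both
--     # children in range (no per-iteration guard), then recurse to the next level
--     if step > 0:
--         for k in range((n - step - 1) // (2 * step), -1, -1):
--             left = 2 * step * k + step - 1
--             right = left + step
--             arr[left], arr[right] = arr[right], arr[left] + arr[right]
--         _sweep(arr, n, step // 2)
-- ===== Notes on version B (the rewrite author's own statement) =====
-- stated objective: alternative
-- what changed: B re-decomposes the down-sweep as a recursion over levels whose inner loop runs guard-free and back-to-front over only the segment indices with both children in range (the per-iteration 'i+step<n' test becomes a computed loop bound), using a simultaneous swap-and-add assignment.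
import Mathlib
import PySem

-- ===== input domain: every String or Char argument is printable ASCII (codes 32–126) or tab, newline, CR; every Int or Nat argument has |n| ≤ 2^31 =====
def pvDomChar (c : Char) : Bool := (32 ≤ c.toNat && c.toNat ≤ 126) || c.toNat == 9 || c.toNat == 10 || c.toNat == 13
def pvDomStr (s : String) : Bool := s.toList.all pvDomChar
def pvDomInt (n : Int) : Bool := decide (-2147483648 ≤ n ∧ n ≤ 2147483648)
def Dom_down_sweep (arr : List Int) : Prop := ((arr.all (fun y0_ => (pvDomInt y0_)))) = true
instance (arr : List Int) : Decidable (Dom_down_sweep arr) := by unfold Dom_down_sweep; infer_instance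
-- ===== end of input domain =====

-- B replaces A's level-by-level loop (with its per-iteration bounds guard) by a recursion over
-- levels whose inner loop runs guard-free and back-to-front over the segment indices; objective:
-- alternative decomposition, same cost.  Python A (and B) mutate arr in place; the equivalence
-- proved here is about the RETURN value.

-- termination helper for both loop ports (Python 'step //= 2')
theorem pvFdivTwoLt (s : Int) (h : 0 < s) : (PySem.Int.floordiv s 2).toNat < s.toNat := by
  have hfd : PySem.Int.floordiv s 2 = s / 2 := by
    simp [PySem.Int.floordiv, Int.fdiv_eq_ediv]
  rw [hfd]; omega

-- ===== PORT A =====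
-- body of A's inner 'for i in range(0, n, step*2)' loop (guard and the three statements, in order)
def aPass (n s : Int) (acc : List Int) (i : Int) : List Int :=
  if i + s < n then
    let temp := PySem.List.pyGetD acc (i + s - 1) 0
    let acc2 := PySem.List.pySetD acc (i + s - 1) (PySem.List.pyGetD acc (i + s * 2 - 1) 0)
    PySem.List.pySetD acc2 (i + s * 2 - 1) (PySem.List.pyGetD acc2 (i + s * 2 - 1) 0 + temp)
  else acc

-- A's 'while step > 0' loop
def aLoop (n s : Int) (a : List Int) : List Int :=
  if h : 0 < s then
    aLoop n (PySem.Int.floordiv s 2) ((PySem.List.pyRange 0 n (s * 2)).foldl (aPass n s) a)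
  else a
termination_by s.toNat
decreasing_by exact pvFdivTwoLt s h

def down_sweep (arr : List Int) : List Int :=
  aLoop (arr.length : Int) (PySem.Int.floordiv (arr.length : Int) 2)
    (PySem.List.pySetD arr (-1) 0)

-- ===== PORT B =====
-- body of B's inner loop: simultaneous assignment 'arr[left], arr[right] = arr[right], arr[left] + arr[right]'
def bPass (s : Int) (acc : List Int) (k : Int) : List Int :=
  let left := 2 * s * k + s - 1
  let right := left + s
  let vl := PySem.List.pyGetD acc left 0
  let vr := PySem.List.pyGetD acc right 0
  PySem.List.pySetD (PySem.List.pySetD acc left vr) right (vl + vr)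

-- B's recursive '_sweep': one guard-free descending level, then recurse on step // 2
def bSweep (n s : Int) (a : List Int) : List Int :=
  if h : 0 < s then
    bSweep n (PySem.Int.floordiv s 2)
      ((PySem.List.pyRange (PySem.Int.floordiv (n - s - 1) (2 * s)) (-1) (-1)).foldl (bPass s) a)
  else a
termination_by s.toNat
decreasing_by exact pvFdivTwoLt s h

def down_sweep_alt (arr : List Int) : List Int :=
  let a0 := PySem.List.pySetD arr (-1) 0
  bSweep (a0.length : Int) (PySem.Int.floordiv (a0.length : Int) 2) a0

-- ===== PRECONDITION & SPEC =====
-- Pre_ excludes exactly the inputs on which Python A raises IndexError: the empty list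
-- (arr[-1] = 0), and the lengths whose down-sweep has a level with a partial last segment whose
-- left child is in range but whose right end is past the end of the list (n % (2*step) > step
-- for some step = n >>> (k+1) of the halving chain).
def Pre_down_sweep (arr : List Int) : Prop :=
  arr ≠ [] ∧ ∀ k < arr.length,
    (arr.length / 2 ^ (k + 1) ≠ 0 → arr.length % (2 * (arr.length / 2 ^ (k + 1))) ≤ arr.length / 2 ^ (k + 1))
instance (arr : List Int) : Decidable (Pre_down_sweep arr) := by unfold Pre_down_sweep; infer_instance

def pvWitness_down_sweep : List Int := [1, 2, 3, 4]

def Spec_down_sweep (arr : List Int) (out : List Int) : Prop := out = down_sweep_alt arr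
instance (arr : List Int) (out : List Int) : Decidable (Spec_down_sweep arr out) := by unfold Spec_down_sweep; infer_instance

-- ===== CLAIM (what is proved, stated in full; the proofs are below) =====
def Claim_equal_down_sweep : Prop := ∀ (arr : List Int), Dom_down_sweep arr → Pre_down_sweep arr → Spec_down_sweep arr (down_sweep arr)

-- ===== LEMMAS AND PROOFS =====

theorem pvFloordiv_pos_eq (x y : Int) (hy : 0 < y) : PySem.Int.floordiv x y = x / y := by
  simp [PySem.Int.floordiv, Int.fdiv_eq_ediv, Or.inl hy.le]

-- reading through a set at a different (nonnegative) index
theorem pvGetD_setD_ne (a : List Int) (i j : Int) (v : Int) (hi : 0 <= i) (hj : 0 <= j)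
    (hne : i ≠ j) : PySem.List.pyGetD (PySem.List.pySetD a i v) j 0 = PySem.List.pyGetD a j 0 := by
  rw [PySem.List.pySetD_of_nonneg _ _ hi, PySem.List.pyGetD_of_nonneg _ _ hj,
      PySem.List.pyGetD_of_nonneg _ _ hj]
  have h : i.toNat ≠ j.toNat := by omega
  simp [List.getD_eq_getElem?_getD, List.getElem?_set_ne h]

theorem pvGetD_setD2_ne (a : List Int) (i j m : Int) (v w : Int) (hi : 0 <= i) (hj : 0 <= j)
    (hm : 0 <= m) (mi : i ≠ m) (mj : j ≠ m) :
    PySem.List.pyGetD (PySem.List.pySetD (PySem.List.pySetD a i v) j w) m 0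
      = PySem.List.pyGetD a m 0 := by
  rw [pvGetD_setD_ne _ _ _ _ hj hm mj, pvGetD_setD_ne _ _ _ _ hi hm mi]

theorem pvSetD_comm (a : List Int) (i j : Int) (v w : Int) (hi : 0 <= i) (hj : 0 <= j)
    (hne : i ≠ j) :
    PySem.List.pySetD (PySem.List.pySetD a i v) j w
      = PySem.List.pySetD (PySem.List.pySetD a j w) i v := by
  rw [PySem.List.pySetD_of_nonneg _ _ hi, PySem.List.pySetD_of_nonneg _ _ hj,
      PySem.List.pySetD_of_nonneg _ _ hj, PySem.List.pySetD_of_nonneg _ _ hi]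
  exact List.set_comm _ _ (by omega)

-- the swap-and-add at an abstract index pair (reads first, then the two writes)
def pvOp (a : List Int) (l r : Int) : List Int :=
  PySem.List.pySetD (PySem.List.pySetD a l (PySem.List.pyGetD a r 0)) r
    (PySem.List.pyGetD a l 0 + PySem.List.pyGetD a r 0)

theorem pvBPass_eq_op (s : Int) (a : List Int) (k : Int) :
    bPass s a k = pvOp a (2 * s * k + s - 1) (2 * s * k + s - 1 + s) := rfl

theorem pvOp_comm (a : List Int) (l1 r1 l2 r2 : Int)
    (hl1 : 0 <= l1) (hr1 : 0 <= r1) (hl2 : 0 <= l2) (hr2 : 0 <= r2)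
    (d1 : l1 ≠ l2) (d2 : l1 ≠ r2) (d3 : r1 ≠ l2) (d4 : r1 ≠ r2) :
    pvOp (pvOp a l1 r1) l2 r2 = pvOp (pvOp a l2 r2) l1 r1 := by
  unfold pvOp
  rw [pvGetD_setD2_ne a l1 r1 l2 _ _ hl1 hr1 hl2 d1 d3,
      pvGetD_setD2_ne a l1 r1 r2 _ _ hl1 hr1 hr2 d2 d4,
      pvGetD_setD2_ne a l2 r2 l1 _ _ hl2 hr2 hl1 d1.symm d2.symm,
      pvGetD_setD2_ne a l2 r2 r1 _ _ hl2 hr2 hr1 d3.symm d4.symm]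
  rw [pvSetD_comm _ r1 l2 _ _ hr1 hl2 d3]
  rw [pvSetD_comm _ l1 l2 _ _ hl1 hl2 d1]
  rw [pvSetD_comm _ r1 r2 _ _ hr1 hr2 d4]
  rw [pvSetD_comm _ l1 r2 _ _ hl1 hr2 d2]

-- two bPass applications at distinct nonnegative segment indices commute
theorem pvBPass_comm (s : Int) (hs : 0 < s) (k1 k2 : Int) (h1 : 0 <= k1) (h2 : 0 <= k2)
    (hne : k1 ≠ k2) (a : List Int) :
    bPass s (bPass s a k1) k2 = bPass s (bPass s a k2) k1 := by
  have hmul : 2 * s * k1 + 2 * s <= 2 * s * k2 ∨ 2 * s * k2 + 2 * s <= 2 * s * k1 := by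
    rcases lt_or_gt_of_ne hne with h | h
    · left
      have := mul_le_mul_of_nonneg_left (by omega : k1 + 1 <= k2) (by positivity : (0:Int) <= 2 * s)
      nlinarith
    · right
      have := mul_le_mul_of_nonneg_left (by omega : k2 + 1 <= k1) (by positivity : (0:Int) <= 2 * s)
      nlinarith
  have hp1 : 0 <= 2 * s * k1 := by positivity
  have hp2 : 0 <= 2 * s * k2 := by positivity
  rw [pvBPass_eq_op, pvBPass_eq_op, pvBPass_eq_op, pvBPass_eq_op]
  exact pvOp_comm a _ _ _ _ (by omega) (by omega) (by omega) (by omega)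
    (by omega) (by omega) (by omega) (by omega)

-- fold over a list of pairwise commuting operations can be reversed
theorem pvFoldlPush {α β : Type} (f : β → α → β) (x : α) (l : List α)
    (h : ∀ y ∈ l, ∀ b, f (f b x) y = f (f b y) x) (b : β) :
    l.foldl f (f b x) = f (l.foldl f b) x := by
  induction l generalizing b with
  | nil => rfl
  | cons y ys ih =>
      simp only [List.foldl_cons]
      rw [h y (by simp) b]
      exact ih (fun z hz b' => h z (by simp [hz]) b') (f b y)

theorem pvFoldlReverse {α β : Type} (f : β → α → β) (l : List α)
    (h : ∀ x ∈ l, ∀ y ∈ l, ∀ b, f (f b x) y = f (f b y) x) (b : β) :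
    l.reverse.foldl f b = l.foldl f b := by
  induction l generalizing b with
  | nil => rfl
  | cons x xs ih =>
      simp only [List.reverse_cons, List.foldl_append, List.foldl_cons, List.foldl_nil]
      rw [ih (fun p hp q hq b' => h p (by simp [hp]) q (by simp [hq]) b') b]
      exact (pvFoldlPush f x xs (fun y hy b' => h x (by simp) y (by simp [hy]) b') b).symm

theorem pvFilterRangeLt (c m : Nat) :
    (List.range c).filter (fun k => decide (k < m)) = List.range (min c m) := by
  rcases le_total c m with h | h
  · rw [Nat.min_eq_left h, List.filter_eq_self.2]
    intro a ha
    simp only [List.mem_range] at ha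
    simp
    omega
  · rw [Nat.min_eq_right h]
    have hc : c = m + (c - m) := by omega
    rw [hc, List.range_add, List.filter_append]
    have e1 : (List.range m).filter (fun k => decide (k < m)) = List.range m := by
      apply List.filter_eq_self.2
      intro a ha
      simp only [List.mem_range] at ha
      simp
      omega
    have e2 : ((List.range (c - m)).map (fun x => m + x)).filter (fun k => decide (k < m)) = [] := by
      apply List.filter_eq_nil_iff.2
      intro a ha
      simp only [List.mem_map, List.mem_range] at ha
      obtain ⟨x, _, hx⟩ := ha
      simp
      omega
    rw [e1, e2, List.append_nil]

-- one level of A equals one level of B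
theorem pvLevelEq (n s : Int) (hs : 0 < s) (a : List Int) :
    (PySem.List.pyRange 0 n (s * 2)).foldl (aPass n s) a
      = (PySem.List.pyRange (PySem.Int.floordiv (n - s - 1) (2 * s)) (-1) (-1)).foldl (bPass s) a := by
  have h2s : (0:Int) < 2 * s := by linarith
  set L : Int := (n - s - 1) / (2 * s) with hL
  set M : Nat := (L + 1).toNat with hM
  -- guard characterization
  have hgd : ∀ k : Nat, (s * 2 * (k:Int) + s < n ↔ k < M) := by
    intro k
    have hmul : (k:Int) * (2 * s) = s * 2 * (k:Int) := by ring
    have h1 : ((k:Int) <= L ↔ (k:Int) * (2 * s) <= n - s - 1) := Int.le_ediv_iff_mul_le h2s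
    rw [hmul] at h1
    generalize hP : s * 2 * (k:Int) = P at h1 ⊢
    omega
  -- B's range is the reversed ascending index list
  have hBr : PySem.List.pyRange (PySem.Int.floordiv (n - s - 1) (2 * s)) (-1) (-1)
      = (List.range M).map (fun j : Nat => (L - (j:Int))) := by
    rw [pvFloordiv_pos_eq _ _ h2s, ← hL, PySem.List.pyRange_neg_one]
    have : (L - (-1)).toNat = M := by omega
    rw [this]
  have hrev : (List.range M).map (fun j : Nat => (L - (j:Int)))
      = ((List.range M).map (fun k : Nat => (k:Int))).reverse := by
    apply List.ext_getElem
    · simp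
    · intro i h1 h2
      simp only [List.getElem_map, List.getElem_range, List.getElem_reverse, List.length_map,
        List.length_range]
      simp only [List.length_map, List.length_range] at h1
      omega
  -- close the B side
  have hcomm : ∀ x ∈ (List.range M).map (fun k : Nat => (k:Int)),
      ∀ y ∈ (List.range M).map (fun k : Nat => (k:Int)), ∀ b : List Int,
      bPass s (bPass s b x) y = bPass s (bPass s b y) x := by
    intro x hx y hy b
    simp only [List.mem_map, List.mem_range] at hx hy
    obtain ⟨kx, _, rfl⟩ := hx
    obtain ⟨ky, _, rfl⟩ := hy
    by_cases hxy : (kx:Int) = (ky:Int)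
    · rw [hxy]
    · exact pvBPass_comm s hs _ _ (by positivity) (by positivity) hxy b
  rw [hBr, hrev, pvFoldlReverse (bPass s) _ hcomm a, List.foldl_map]
  -- now the A side
  rcases le_or_gt n 0 with hn | hn
  · have hM0 : M = 0 := by
      have hneg : L < 0 := by
        by_contra hge
        have hge' : (0:Int) ≤ L := by omega
        have h := (Int.le_ediv_iff_mul_le h2s).1 hge'
        rw [zero_mul] at h
        omega
      omega
    rw [PySem.List.pyRange_of_pos 0 n (by linarith : (0:Int) < s * 2)]
    rw [if_neg (by omega : ¬ (0:Int) < n)]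
    simp [hM0]
  · rw [PySem.List.pyRange_of_pos 0 n (by linarith : (0:Int) < s * 2)]
    rw [if_pos hn]
    set C : Nat := ((n - 0 + s * 2 - 1) / (s * 2)).toNat with hC
    have hMC : M <= C := by
      have hdm : L * (2 * s) <= n - s - 1 := Int.ediv_mul_le (n - s - 1) (by omega : (2:Int) * s ≠ 0)
      have hle : L + 1 <= (n - 0 + s * 2 - 1) / (s * 2) := by
        rw [Int.le_ediv_iff_mul_le (by linarith : (0:Int) < s * 2)]
        nlinarith
      generalize hD : (n - 0 + s * 2 - 1) / (s * 2) = D at hle hC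
      omega
    rw [List.foldl_map]
    have hbody : ∀ (acc : List Int), ∀ k ∈ List.range C,
        aPass n s acc (0 + s * 2 * (k:Int)) = if k < M then bPass s acc (k:Int) else acc := by
      intro acc k _
      rw [zero_add]
      by_cases hk : s * 2 * (k:Int) + s < n
      · rw [if_pos ((hgd k).1 hk)]
        simp only [aPass]
        rw [if_pos hk]
        have e1 : s * 2 * (k:Int) + s - 1 = 2 * s * (k:Int) + s - 1 := by ring
        have e2 : s * 2 * (k:Int) + s * 2 - 1 = 2 * s * (k:Int) + s - 1 + s := by ring
        rw [e1, e2]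
        have hk0 : (0:Int) <= 2 * s * (k:Int) := by positivity
        have hlpos : (0:Int) <= 2 * s * (k:Int) + s - 1 := by omega
        have hrpos : (0:Int) <= 2 * s * (k:Int) + s - 1 + s := by omega
        have hlr : 2 * s * (k:Int) + s - 1 ≠ 2 * s * (k:Int) + s - 1 + s := by omega
        rw [pvBPass_eq_op]
        unfold pvOp
        rw [pvGetD_setD_ne _ _ _ _ hlpos hrpos hlr]
        rw [add_comm (PySem.List.pyGetD acc (2 * s * (k:Int) + s - 1 + s) 0)
            (PySem.List.pyGetD acc (2 * s * (k:Int) + s - 1) 0)]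
      · rw [if_neg (fun h => hk ((hgd k).2 h))]
        simp only [aPass]
        rw [if_neg hk]
    have step1 := PySem.List.foldl_congr_mem (List.range C)
      (fun (x : List Int) (y : Nat) => aPass n s x (0 + s * 2 * (y:Int)))
      (fun (acc : List Int) (k : Nat) => if k < M then bPass s acc (k:Int) else acc) a hbody
    have step2 := PySem.List.foldl_ite_eq_foldl_filter (fun k : Nat => k < M)
      (fun (acc : List Int) (k : Nat) => bPass s acc (k:Int)) (List.range C) a
    rw [step1, step2, pvFilterRangeLt, Nat.min_eq_right hMC]

theorem pvLoopEq : ∀ (m : Nat) (n s : Int), s.toNat <= m → ∀ a : List Int,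
    aLoop n s a = bSweep n s a := by
  intro m
  induction m with
  | zero =>
      intro n s hs a
      rw [aLoop, bSweep]
      rw [dif_neg (by omega), dif_neg (by omega)]
  | succ m ih =>
      intro n s hs a
      by_cases h : 0 < s
      · rw [aLoop, bSweep, dif_pos h, dif_pos h, pvLevelEq n s h a]
        exact ih n _ (by have := pvFdivTwoLt s h; omega) _
      · rw [aLoop, bSweep, dif_neg h, dif_neg h]

-- ===== VERDICT (by name: the statement is the Claim_ definition above) =====
theorem down_sweep_spec : Claim_equal_down_sweep := by
  intro arr _ _
  unfold Spec_down_sweep down_sweep down_sweep_alt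
  simp only [PySem.List.length_pySetD]
  exact pvLoopEq (PySem.Int.floordiv (arr.length : Int) 2).toNat _ _ le_rfl _
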